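-- pv_equiv track=rewrite | github.com/tillbiskup/cwepr | cwepr/io/bes3t.py | _subdivide_part1
-- ===== SOURCE A (Python) =====
-- import collections
--
-- def _subdivide_part1(part1):
--     r"""Pre process the first part of a \*.DSC file.
--
--     First part corresponds to "Descriptor Information. The crude string is
--     split into subdivisions; the delimiter employed allows to detect the
--     different headlines made up of three lines starting with asterisks,
--     the center line containing additional text.
--
--     Each subdivision is then transformed into a dict entry with the
--     headline, stripped of the first two characters (\*\t) as key and the
--     remaining information as value. Lines containing an asterisk only are
--     removed.
--
--     Parameters
--     ----------
--     part1: :class:`str`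
--         Raw first part of a file.
--
--     Returns
--     -------
--     part1_clean: :class:`dict`
--         All subdivisions from the file with headlines as keys and list of
--         lines as values; lines devoid of information removed.
--
--     """
--     lines = part1.split("\n")
--     part1_clean = collections.OrderedDict()
--     current_subpart = list()
--     for line in lines:
--         if "*" in line and "*\t" not in line:
--             continue
--         if "*\t" in line and current_subpart != list():
--             part1_clean[current_subpart[0][2:]] = current_subpart[1:]
--             current_subpart = list()
--         current_subpart.append(line)
--     part1_clean[current_subpart[0][2:]] = current_subpart[1:]
--     return part1_clean
-- ===== SOURCE B (Python) =====
-- import collections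
--
--
-- def _subdivide_part1(part1):
--     lines = [line for line in part1.split("\n")
--              if "*" not in line or "*\t" in line]
--
--     def chunks(ls):
--         head = ls[0]
--         i = 1
--         while i < len(ls) and "*\t" not in ls[i]:
--             i += 1
--         result = [(head[2:], ls[1:i])]
--         if i < len(ls):
--             result += chunks(ls[i:])
--         return result
--
--     return collections.OrderedDict(chunks(lines))
-- ===== Notes on version B (the rewrite author's own statement) =====
-- stated objective: alternative
-- what changed: B first builds the filtered line list (dropping asterisk-only lines) and then recursively partitions it into header-delimited chunks mapped to (header[2:], body) pairs, instead of A's single pass that interleaves skipping with a mutable accumulator flushed inside the loop.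
import Mathlib
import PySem

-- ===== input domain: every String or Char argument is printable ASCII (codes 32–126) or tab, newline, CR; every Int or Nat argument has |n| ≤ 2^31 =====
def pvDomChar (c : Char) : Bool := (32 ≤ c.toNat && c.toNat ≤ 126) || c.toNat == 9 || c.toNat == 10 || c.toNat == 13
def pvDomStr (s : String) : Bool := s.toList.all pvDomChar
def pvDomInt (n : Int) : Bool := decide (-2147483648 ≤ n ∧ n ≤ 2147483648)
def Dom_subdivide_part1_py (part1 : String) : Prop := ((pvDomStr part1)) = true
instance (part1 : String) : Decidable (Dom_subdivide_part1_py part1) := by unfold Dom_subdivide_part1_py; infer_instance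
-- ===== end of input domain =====

-- One honest line: B first filters out asterisk-only lines, then recursively splits the
-- filtered list into header-delimited chunks, instead of A's one pass with a mutable
-- accumulator flushed inside the loop (objective: alternative decomposition, same cost).

-- ===== PORT A =====
-- '"*" in line and "*\t" not in line'
def pvSkipA (l : String) : Bool := PySem.Str.isIn "*" l && !PySem.Str.isIn "*\t" l

-- the for-loop of A over the remaining lines, state = (part1_clean, current_subpart)
def pvLoopA : List String → PySem.Dict String (List String) → List String →
    PySem.Dict String (List String) × List String
  | [], d, cur => (d, cur)
  | l :: ls, d, cur =>
    if pvSkipA l then pvLoopA ls d cur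
    else
      match cur with
      | [] => pvLoopA ls d [l]                 -- 'current_subpart != list()' is False: just append
      | c0 :: cs =>
        if PySem.Str.isIn "*\t" l then         -- flush, reset, then append line
          pvLoopA ls (d.insert (PySem.Str.slice c0 (some 2) none) cs) [l]
        else
          pvLoopA ls d (c0 :: (cs ++ [l]))     -- just append

-- the final 'part1_clean[current_subpart[0][2:]] = current_subpart[1:]' of A
def pvFinishA : PySem.Dict String (List String) × List String → PySem.Dict String (List String)
  | (d, []) => d                -- Python raises IndexError here; excluded by Pre_
  | (d, c0 :: cs) => d.insert (PySem.Str.slice c0 (some 2) none) cs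

def subdivide_part1_py (part1 : String) : List (String × List String) :=
  (pvFinishA (pvLoopA ((PySem.Str.split? part1 "\n").getD []) PySem.Dict.empty [])).items

-- ===== PORT B =====
-- B's filtered line list: '"*" not in line or "*\t" in line'
def pvKeepB (l : String) : Bool := !PySem.Str.isIn "*" l || PySem.Str.isIn "*\t" l

def pvFilteredB (part1 : String) : List String :=
  ((PySem.Str.split? part1 "\n").getD []).filter pvKeepB

-- Source B's 'chunks': head, scan forward while not a header (the while loop = takeWhile /
-- dropWhile split of the tail), recurse on the rest if nonempty
def pvChunksB : List String → List (String × List String)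
  | [] => []          -- Source B raises IndexError on ls[0]; excluded by Pre_
  | h :: t =>
    let body := t.takeWhile (fun l => !PySem.Str.isIn "*\t" l)
    let rest := t.dropWhile (fun l => !PySem.Str.isIn "*\t" l)
    (PySem.Str.slice h (some 2) none, body) ::
      (if rest.isEmpty then [] else pvChunksB rest)
  termination_by ls => ls.length
  decreasing_by
    exact Nat.lt_succ_of_le (List.length_dropWhile_le _ _)

def subdivide_part1_py_alt (part1 : String) : List (String × List String) :=
  ((pvChunksB (pvFilteredB part1)).foldl
      (fun d p => d.insert p.1 p.2) PySem.Dict.empty).items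

-- ===== PRECONDITION & SPEC =====
-- Pre_ excludes exactly the inputs on which the Python A raises IndexError: inputs in which
-- EVERY line contains '*' but not '*\t' (so nothing is ever accumulated); B raises there too.
def Pre_subdivide_part1_py (part1 : String) : Prop :=
  ((PySem.Str.split? part1 "\n").getD []).any
    (fun l => !PySem.Str.isIn "*" l || PySem.Str.isIn "*\t" l) = true
instance (part1 : String) : Decidable (Pre_subdivide_part1_py part1) := by
  unfold Pre_subdivide_part1_py; infer_instance

def pvWitness_subdivide_part1_py : String := "*\n*\tDESC\nkey\tval\n*\tDVAL\na, b"

def Spec_subdivide_part1_py (part1 : String) (out : List (String × List String)) : Prop :=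
  out = subdivide_part1_py_alt part1
instance (part1 : String) (out : List (String × List String)) :
    Decidable (Spec_subdivide_part1_py part1 out) := by
  unfold Spec_subdivide_part1_py; infer_instance

-- ===== CLAIM (what is proved, stated in full; the proofs are below) =====
def Claim_equal_subdivide_part1_py : Prop := ∀ (part1 : String), Dom_subdivide_part1_py part1 → Pre_subdivide_part1_py part1 → Spec_subdivide_part1_py part1 (subdivide_part1_py part1)

-- ===== LEMMAS AND PROOFS =====

-- A's loop ignores skipped lines: running it on a list equals running it on the filtered list.
-- pvKeepB is the negation of pvSkipA
theorem pvKeep_eq_not_skip (l : String) : pvKeepB l = !pvSkipA l := by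
  simp only [pvKeepB, pvSkipA]
  cases PySem.Str.isIn "*" l <;> cases PySem.Str.isIn "*\t" l <;> rfl

-- step equations of A's loop (definitional unfoldings)
theorem pvLoopA_skip (l : String) (ls : List String) (d : PySem.Dict String (List String))
    (cur : List String) (h : pvSkipA l = true) :
    pvLoopA (l :: ls) d cur = pvLoopA ls d cur := by
  cases cur <;> (rw [pvLoopA, h]; simp)

theorem pvLoopA_nilcur (l : String) (ls : List String) (d : PySem.Dict String (List String))
    (h : pvSkipA l = false) :
    pvLoopA (l :: ls) d [] = pvLoopA ls d [l] := by
  rw [pvLoopA, h]; simp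

theorem pvLoopA_flush (l c0 : String) (ls cs : List String) (d : PySem.Dict String (List String))
    (h : pvSkipA l = false) (hh : PySem.Str.isIn "*\t" l = true) :
    pvLoopA (l :: ls) d (c0 :: cs) =
      pvLoopA ls (d.insert (PySem.Str.slice c0 (some 2) none) cs) [l] := by
  rw [pvLoopA, h, hh]; simp

theorem pvLoopA_app (l c0 : String) (ls cs : List String) (d : PySem.Dict String (List String))
    (h : pvSkipA l = false) (hh : PySem.Str.isIn "*\t" l = false) :
    pvLoopA (l :: ls) d (c0 :: cs) = pvLoopA ls d (c0 :: (cs ++ [l])) := by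
  rw [pvLoopA, h, hh]; simp

theorem pvLoopA_filter (lines : List String) (d : PySem.Dict String (List String))
    (cur : List String) :
    pvLoopA lines d cur = pvLoopA (lines.filter pvKeepB) d cur := by
  induction lines generalizing d cur with
  | nil => rfl
  | cons l ls ih =>
    cases h : pvSkipA l with
    | true =>
      have hk : pvKeepB l = false := by rw [pvKeep_eq_not_skip, h]; rfl
      rw [pvLoopA_skip l ls d cur h, List.filter_cons, if_neg (by rw [hk]; simp)]
      exact ih d cur
    | false =>
      have hk : pvKeepB l = true := by rw [pvKeep_eq_not_skip, h]; rfl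
      rw [List.filter_cons, if_pos (by rw [hk])]
      cases cur with
      | nil => rw [pvLoopA_nilcur l ls d h, pvLoopA_nilcur l _ d h]; apply ih
      | cons c0 cs =>
        cases hh : PySem.Str.isIn "*\t" l with
        | true =>
          rw [pvLoopA_flush l c0 ls cs d h hh, pvLoopA_flush l c0 _ cs d h hh]; apply ih
        | false =>
          rw [pvLoopA_app l c0 ls cs d h hh, pvLoopA_app l c0 _ cs d h hh]; apply ih

-- unfolding equation for pvChunksB on a cons cell
theorem pvChunksB_cons (h : String) (t : List String) :
    pvChunksB (h :: t) =
      (PySem.Str.slice h (some 2) none, t.takeWhile (fun l => !PySem.Str.isIn "*\t" l)) ::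
        (if (t.dropWhile (fun l => !PySem.Str.isIn "*\t" l)).isEmpty then []
         else pvChunksB (t.dropWhile (fun l => !PySem.Str.isIn "*\t" l))) := by
  rw [pvChunksB.eq_def]

-- Main invariant: from a nonempty accumulator c0 :: cs whose tail cs holds no header lines,
-- running A's loop over filtered lines and doing the final flush equals folding B's chunks
-- of c0 :: (cs ++ ls) into the dict.
theorem pvMain (ls : List String) (c0 : String) (cs : List String)
    (d : PySem.Dict String (List String))
    (hskip : ∀ x ∈ ls, pvSkipA x = false)
    (hcs : ∀ x ∈ cs, PySem.Str.isIn "*\t" x = false) :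
    pvFinishA (pvLoopA ls d (c0 :: cs)) =
    (pvChunksB (c0 :: (cs ++ ls))).foldl (fun d p => d.insert p.1 p.2) d := by
  induction ls generalizing c0 cs d with
  | nil =>
    have htake : cs.takeWhile (fun l => !PySem.Str.isIn "*\t" l) = cs :=
      List.takeWhile_eq_self_iff.mpr (by intro x hx; rw [hcs x hx]; rfl)
    have hdrop : cs.dropWhile (fun l => !PySem.Str.isIn "*\t" l) = [] :=
      List.dropWhile_eq_nil_iff.mpr (by intro x hx; rw [hcs x hx]; rfl)
    rw [List.append_nil, pvChunksB_cons, htake, hdrop]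
    simp [pvLoopA, pvFinishA]
  | cons l ls ih =>
    have hl : pvSkipA l = false := hskip l (by simp)
    have hskip' : ∀ x ∈ ls, pvSkipA x = false := fun x hx => hskip x (by simp [hx])
    by_cases hh : PySem.Str.isIn "*\t" l = true
    · -- header line: flush
      have hh2 : PySem.Chars.isIn ['*', '\t'] l.toList = true := by simpa using hh
      have htake : (cs ++ l :: ls).takeWhile (fun l => !PySem.Str.isIn "*\t" l) = cs := by
        rw [List.takeWhile_append_of_pos (by intro x hx; rw [hcs x hx]; rfl)]
        simp [hh2]
      have hdrop : (cs ++ l :: ls).dropWhile (fun l => !PySem.Str.isIn "*\t" l) = l :: ls := by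
        rw [List.dropWhile_append_of_pos (by intro x hx; rw [hcs x hx]; rfl)]
        simp [hh2]
      have step := pvLoopA_flush l c0 ls cs d hl hh
      rw [step, ih l [] _ hskip' (by simp), pvChunksB_cons c0 (cs ++ l :: ls), htake, hdrop]
      simp
    · -- non-header line: append to the accumulator
      have hh' : PySem.Str.isIn "*\t" l = false := by
        cases hb : PySem.Str.isIn "*\t" l
        · rfl
        · exact absurd hb hh
      have step := pvLoopA_app l c0 ls cs d hl hh'
      have hcs' : ∀ x ∈ cs ++ [l], PySem.Str.isIn "*\t" x = false := by
        intro x hx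
        rcases List.mem_append.mp hx with h | h
        · exact hcs x h
        · simp at h; subst h; exact hh'
      rw [step, ih c0 (cs ++ [l]) d hskip' hcs']
      simp

theorem pvSkip_of_keep (l : String) (h : pvKeepB l = true) : pvSkipA l = false := by
  have e := pvKeep_eq_not_skip l
  rw [h] at e
  cases hs : pvSkipA l
  · rfl
  · rw [hs] at e; exact absurd e (by decide)

-- ===== VERDICT (by name: the statement is the Claim_ definition above) =====
theorem subdivide_part1_py_spec : Claim_equal_subdivide_part1_py := by
  intro part1 _ hpre
  unfold Spec_subdivide_part1_py subdivide_part1_py subdivide_part1_py_alt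
  rw [pvLoopA_filter]
  show (pvFinishA (pvLoopA (pvFilteredB part1) PySem.Dict.empty [])).items = _
  have hmem : ∀ x ∈ pvFilteredB part1, pvKeepB x = true := by
    intro x hx; exact List.of_mem_filter hx
  unfold Pre_subdivide_part1_py at hpre
  have hne : pvFilteredB part1 ≠ [] := by
    rw [List.any_eq_true] at hpre
    obtain ⟨x, hx, hpx⟩ := hpre
    intro hnil
    have : x ∈ pvFilteredB part1 := by
      unfold pvFilteredB
      exact List.mem_filter.mpr ⟨hx, by simpa [pvKeepB] using hpx⟩
    simp [hnil] at this
  obtain ⟨c0, cs, hEq⟩ := List.exists_cons_of_ne_nil hne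
  have hc0 : pvSkipA c0 = false :=
    pvSkip_of_keep c0 (hmem c0 (by rw [hEq]; simp))
  have hstep : pvLoopA (c0 :: cs) PySem.Dict.empty ([] : List String) =
      pvLoopA cs PySem.Dict.empty [c0] := pvLoopA_nilcur c0 cs PySem.Dict.empty hc0
  rw [hEq, hstep, pvMain cs c0 [] PySem.Dict.empty
    (fun x hx => pvSkip_of_keep x (hmem x (by rw [hEq]; simp [hx]))) (by simp)]
  simp
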